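-- pv_equiv track=rewrite | github.com/university-of-southampton-1920/qiuzhao2020 | 2020_04_20/biss_1349.py | cross_ok
-- ===== SOURCE A (Python) =====
-- def cross_ok(cur, pre, N):
--     tmp1 = []
--     tmp2 = []
--     for i in range(N):
--         tmp1.append(cur%2)
--         tmp2.append(pre%2)
--         cur >>= 1
--         pre >>= 1
--     for i in range(N):
--         if tmp1[i] == 1 and i-1 >= 0 and tmp2[i-1] == 1:
--             return False
--         if tmp1[i] == 1 and i+1 < N and tmp2[i+1] == 1:
--             return False
--     return True
-- ===== SOURCE B (Python) =====
-- def cross_ok(cur, pre, N):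
--     if N <= 0:
--         return True
--     mask = (1 << N) - 1
--     c = cur & mask
--     p = pre & mask
--     return (c & ((p << 1) | (p >> 1))) == 0
-- ===== Notes on version B (the rewrite author's own statement) =====
-- stated objective: faster
-- what changed: Replaces A's two per-bit loops (building explicit bit lists, then scanning them index by index) with a constant number of whole-number bitwise operations: mask both numbers to N bits and test cur & ((pre<<1)|(pre>>1)) == 0.
import Mathlib
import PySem

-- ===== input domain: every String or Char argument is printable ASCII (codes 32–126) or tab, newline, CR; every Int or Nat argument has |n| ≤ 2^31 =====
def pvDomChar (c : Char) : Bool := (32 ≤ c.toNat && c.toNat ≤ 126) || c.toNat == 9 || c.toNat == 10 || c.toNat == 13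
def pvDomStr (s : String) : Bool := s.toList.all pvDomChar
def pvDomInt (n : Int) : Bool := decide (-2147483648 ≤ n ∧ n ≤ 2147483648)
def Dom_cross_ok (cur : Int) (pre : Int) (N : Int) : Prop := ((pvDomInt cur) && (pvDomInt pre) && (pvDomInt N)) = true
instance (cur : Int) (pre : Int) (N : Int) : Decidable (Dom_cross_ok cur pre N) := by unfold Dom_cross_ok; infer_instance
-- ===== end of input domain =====

-- B replaces A's two per-bit loops with a few whole-number bitwise operations
-- (mask to N bits, then test cur & ((pre<<1)|(pre>>1)) == 0); measurably faster.


-- ===== PORT A =====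
-- tmp[i] for a Python list held as an Array (append = push); exact for the in-range and
-- negative-wraparound indices Python accepts (here every index used is in range)
def pyAGet (a : Array Int) (i : Int) : Int :=
  if i < 0 then a.getD (i + a.size).toNat 0 else a.getD i.toNat 0

-- one iteration of A's first loop; state = (tmp1, cur, tmp2, pre)
def crossStep (s : Array Int × Int × Array Int × Int) (_i : Int) : Array Int × Int × Array Int × Int :=
  (s.1.push (PySem.Int.mod s.2.1 2), s.2.1 >>> (1 : Nat), s.2.2.1.push (PySem.Int.mod s.2.2.2 2), s.2.2.2 >>> (1 : Nat))

-- A's second loop with its early returns (indices from range(N); lookups always in range)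
def crossScan (t1 t2 : Array Int) (N : Int) : List Int → Bool
  | [] => true
  | i :: rest =>
    if pyAGet t1 i == 1 && decide ((0 : Int) ≤ i - 1) && pyAGet t2 (i - 1) == 1 then false
    else if pyAGet t1 i == 1 && decide (i + 1 < N) && pyAGet t2 (i + 1) == 1 then false
    else crossScan t1 t2 N rest

def cross_ok (cur : Int) (pre : Int) (N : Int) : Bool :=
  let st := (PySem.List.pyRange 0 N 1).foldl crossStep (#[], cur, #[], pre)
  crossScan st.1 st.2.2.1 N (PySem.List.pyRange 0 N 1)

-- ===== PORT B =====
def cross_ok_alt (cur : Int) (pre : Int) (N : Int) : Bool :=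
  if N ≤ 0 then true
  else
    let mask : Int := (1 : Int) <<< N.toNat - 1   -- 1 << N (here 0 < N, so .toNat is exact)
    let c := PySem.Int.band cur mask
    let p := PySem.Int.band pre mask
    PySem.Int.band c (PySem.Int.bor (p <<< (1 : Nat)) (p >>> (1 : Nat))) == 0

-- ===== PRECONDITION & SPEC =====
def Spec_cross_ok (cur : Int) (pre : Int) (N : Int) (out : Bool) : Prop := out = cross_ok_alt cur pre N
instance (cur : Int) (pre : Int) (N : Int) (out : Bool) : Decidable (Spec_cross_ok cur pre N out) := by unfold Spec_cross_ok; infer_instance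

-- ===== CLAIM (what is proved, stated in full; the proofs are below) =====
def Claim_equal_cross_ok : Prop := ∀ (cur : Int) (pre : Int) (N : Int), Dom_cross_ok cur pre N → Spec_cross_ok cur pre N (cross_ok cur pre N)

-- ===== LEMMAS AND PROOFS =====

-- bit i of x as A computes it: ((x >> i) % 2)
def bitf (x : Int) (i : Nat) : Int := PySem.Int.mod (x >>> i) 2

theorem shiftR_one_shiftR (x : Int) (i : Nat) : (x >>> (1 : Nat)) >>> i = x >>> (1 + i) := by
  rw [Int.shiftRight_eq_div_pow, Int.shiftRight_eq_div_pow, Int.shiftRight_eq_div_pow,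
    Int.ediv_ediv_of_nonneg (by positivity)]
  congr 1
  push_cast [pow_add]
  ring

theorem bitf_shiftR (x : Int) (i : Nat) : bitf (x >>> (1 : Nat)) i = bitf x (i + 1) := by
  unfold bitf
  rw [shiftR_one_shiftR, Nat.add_comm]

theorem crossFold (l : List Int) : ∀ (t1 t2 : Array Int) (c p : Int),
    l.foldl crossStep (t1, c, t2, p) =
      ((t1.toList ++ (List.range l.length).map (bitf c)).toArray, c >>> l.length,
       (t2.toList ++ (List.range l.length).map (bitf p)).toArray, p >>> l.length) := by
  induction l with
  | nil => intro t1 t2 c p; simp [Int.shiftRight_eq_div_pow]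
  | cons a l ih =>
    intro t1 t2 c p
    have hr : ∀ (x : Int), (List.range (l.length + 1)).map (bitf x)
        = PySem.Int.mod x 2 :: (List.range l.length).map (bitf (x >>> (1 : Nat))) := by
      intro x
      rw [List.range_succ_eq_map]
      simp only [List.map_cons, List.map_map]
      refine congrArg₂ List.cons ?_ ?_
      · simp [bitf]
      · refine List.map_congr_left ?_
        intro k _
        simp [Function.comp, bitf_shiftR]
    simp only [List.foldl_cons, crossStep, List.length_cons]
    rw [ih]
    simp only [hr, shiftR_one_shiftR]
    simp [Nat.add_comm]

theorem crossScan_eq_true_iff (t1 t2 : Array Int) (N : Int) (l : List Int) :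
    crossScan t1 t2 N l = true ↔ ∀ i ∈ l,
      ¬(pyAGet t1 i = 1 ∧ (0 : Int) ≤ i - 1 ∧ pyAGet t2 (i - 1) = 1) ∧
      ¬(pyAGet t1 i = 1 ∧ i + 1 < N ∧ pyAGet t2 (i + 1) = 1) := by
  induction l with
  | nil => simp [crossScan]
  | cons a l ih =>
    simp only [crossScan, List.mem_cons]
    split_ifs with h1 h2
    · simp only [Bool.and_eq_true, beq_iff_eq, decide_eq_true_eq] at h1
      constructor
      · intro h; exact absurd h (by simp)
      · intro h; exact absurd ⟨h1.1.1, h1.1.2, h1.2⟩ (h a (Or.inl rfl)).1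
    · simp only [Bool.and_eq_true, beq_iff_eq, decide_eq_true_eq] at h2
      constructor
      · intro h; exact absurd h (by simp)
      · intro h; exact absurd ⟨h2.1.1, h2.1.2, h2.2⟩ (h a (Or.inl rfl)).2
    · rw [ih]
      constructor
      · intro h i hi
        rcases hi with rfl | hi
        · refine ⟨fun hc => h1 ?_, fun hc => h2 ?_⟩
          · simp only [Bool.and_eq_true, beq_iff_eq, decide_eq_true_eq]
            exact ⟨⟨hc.1, hc.2.1⟩, hc.2.2⟩
          · simp only [Bool.and_eq_true, beq_iff_eq, decide_eq_true_eq]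
            exact ⟨⟨hc.1, hc.2.1⟩, hc.2.2⟩
        · exact h i hi
      · intro h i hi; exact h i (Or.inr hi)

-- Python's a & ((1<<n)-1) is a % (1<<n), also for negative a
theorem band_mask (a : Int) (n : Nat) :
    PySem.Int.band a (((2 ^ n : Nat) : Int) - 1) = a % ((2 ^ n : Nat) : Int) := by
  have hK : (1 : Nat) ≤ 2 ^ n := Nat.one_le_two_pow
  have hmask : (((2 ^ n : Nat) : Int) - 1) = ((2 ^ n - 1 : Nat) : Int) := by push_cast [hK]; ring
  by_cases ha : 0 ≤ a
  · rw [hmask, PySem.Int.band_of_nonneg ha (by positivity)]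
    rw [Int.toNat_natCast, Nat.and_two_pow_sub_one_eq_mod, Int.natCast_mod]
    conv_rhs => rw [← Int.toNat_of_nonneg ha]
  · have ha' : a < 0 := by omega
    have hb : (0 : Int) ≤ ((2 ^ n : Nat) : Int) - 1 := by
      have : (1 : Int) ≤ ((2 ^ n : Nat) : Int) := by exact_mod_cast hK
      omega
    unfold PySem.Int.band
    rw [if_neg (by omega), if_pos hb]
    set m : Nat := (-a - 1).toNat with hm
    have ham : a = -(m : Int) - 1 := by omega
    have htb : (((2 ^ n : Nat) : Int) - 1).toNat = 2 ^ n - 1 := by omega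
    rw [htb]
    have hand : (2 ^ n - 1) &&& m = m % 2 ^ n := by
      rw [Nat.land_comm, Nat.and_two_pow_sub_one_eq_mod]
    rw [hand]
    -- right-hand side: (-(m)-1) % 2^n = 2^n - 1 - m % 2^n
    set K : Nat := 2 ^ n with hKdef
    have hKpos : 0 < K := Nat.pos_of_ne_zero (by positivity)
    have hdm : m = K * (m / K) + m % K := (Nat.div_add_mod m K).symm
    have hrlt : m % K < K := Nat.mod_lt _ hKpos
    have hmd : (m : Int) = (K : Int) * ((m / K : Nat) : Int) + ((m % K : Nat) : Int) := by
      exact_mod_cast hdm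
    have hsub : ((K - 1 - m % K : Nat) : Int) = (K : Int) - 1 - ((m % K : Nat) : Int) := by omega
    have h1 : a = ((K - 1 - m % K : Nat) : Int) + (K : Int) * (-(1 : Int) - (m / K : Nat)) := by
      rw [ham, hmd, hsub]
      ring
    rw [h1, Int.add_mul_emod_self_left,
      Int.emod_eq_of_lt (by positivity) (by exact_mod_cast (by omega : K - 1 - m % K < K))]

-- low bit of the masked value = the bit A's loop extracts
theorem testBit_emod_pow (a : Int) (n i : Nat) (h : i < n) :
    ((a % ((2 ^ n : Nat) : Int)).toNat).testBit i = decide (bitf a i = 1) := by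
  have hKpos : (0 : Int) < ((2 ^ n : Nat) : Int) := by positivity
  set C : Nat := (a % ((2 ^ n : Nat) : Int)).toNat with hC
  have hCnn : (0 : Int) ≤ a % ((2 ^ n : Nat) : Int) := Int.emod_nonneg a (by positivity)
  have hCe : (C : Int) = a % ((2 ^ n : Nat) : Int) := Int.toNat_of_nonneg hCnn
  have hq : a = ((2 ^ n : Nat) : Int) * (a / ((2 ^ n : Nat) : Int)) + (C : Int) := by
    rw [hCe]
    exact (Int.mul_ediv_add_emod a _).symm
  have hcastpow : ((2 ^ n : Nat) : Int) = ((2 ^ i : Nat) : Int) * (((2 ^ (n - i - 1) : Nat) : Int) * 2) := by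
    have hpow : (2 ^ n : Nat) = 2 ^ i * (2 ^ (n - i - 1) * 2) := by
      rw [← pow_succ, ← pow_add]
      congr 1
      omega
    rw [hpow]
    push_cast
    ring
  have hsplit : a = (C : Int) + ((a / ((2 ^ n : Nat) : Int)) * ((2 ^ (n - i - 1) : Nat) : Int) * 2) * ((2 ^ i : Nat) : Int) := by
    conv_lhs => rw [hq]
    rw [hcastpow]
    ring
  have hdiv : a / ((2 ^ i : Nat) : Int)
      = (C : Int) / ((2 ^ i : Nat) : Int) + (a / ((2 ^ n : Nat) : Int)) * ((2 ^ (n - i - 1) : Nat) : Int) * 2 := by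
    conv_lhs => rw [hsplit]
    exact Int.add_mul_ediv_right _ _ (by positivity)
  have hbitf : bitf a i = ((C / 2 ^ i % 2 : Nat) : Int) := by
    unfold bitf
    rw [PySem.Int.mod_eq_emod_of_pos (by norm_num), Int.shiftRight_eq_div_pow, hdiv]
    have : (C : Int) / ((2 ^ i : Nat) : Int) + (a / ((2 ^ n : Nat) : Int)) * ((2 ^ (n - i - 1) : Nat) : Int) * 2
        = (C : Int) / ((2 ^ i : Nat) : Int) + 2 * ((a / ((2 ^ n : Nat) : Int)) * ((2 ^ (n - i - 1) : Nat) : Int)) := by ring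
    rw [this, Int.add_mul_emod_self_left, ← Int.natCast_div]
    push_cast
    ring
  rw [hbitf]
  have : Nat.testBit C i = (C >>> i % 2 == 1) := by simp [Nat.testBit]
  rw [this, Nat.shiftRight_eq_div_pow]
  rcases Nat.mod_two_eq_zero_or_one (C / 2 ^ i) with hm | hm <;> simp [hm]

theorem testBit_emod_pow_high (a : Int) (n i : Nat) (h : n ≤ i) :
    ((a % ((2 ^ n : Nat) : Int)).toNat).testBit i = false := by
  apply Nat.testBit_lt_two_pow
  have h1 : a % ((2 ^ n : Nat) : Int) < ((2 ^ n : Nat) : Int) := Int.emod_lt_of_pos a (by positivity)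
  have h2 : (a % ((2 ^ n : Nat) : Int)).toNat < 2 ^ n := by omega
  exact h2.trans_le (Nat.pow_le_pow_right (by norm_num) h)

theorem land_eq_zero_iff (x y : Nat) :
    x &&& y = 0 ↔ ∀ i, ¬(x.testBit i = true ∧ y.testBit i = true) := by
  constructor
  · intro h i ⟨hx, hy⟩
    have := Nat.testBit_land x y i
    rw [h, Nat.zero_testBit, hx, hy] at this
    simp at this
  · intro h
    apply Nat.eq_of_testBit_eq
    intro i
    rw [Nat.testBit_land, Nat.zero_testBit]
    specialize h i
    cases hx : x.testBit i <;> cases hy : y.testBit i <;> simp_all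

theorem cross_ok_spec_aux (cur pre N : Int) : cross_ok cur pre N = cross_ok_alt cur pre N := by
  rw [Bool.eq_iff_iff]
  by_cases hN : N ≤ 0
  · have hrange : PySem.List.pyRange 0 N 1 = [] := by
      rw [PySem.List.pyRange_one]
      have : (N - 0).toNat = 0 := by omega
      rw [this]
      simp
    simp [cross_ok, cross_ok_alt, hrange, hN, crossScan]
  · have hN' : 0 < N := by omega
    set n : Nat := N.toNat with hn
    have hNn : N = (n : Int) := by omega
    have hnpos : 0 < n := by omega
    have hrange : PySem.List.pyRange 0 N 1 = (List.range n).map (fun k : Nat => (k : Int)) := by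
      rw [PySem.List.pyRange_one]
      have : (N - 0).toNat = n := by omega
      rw [this]
      simp only [zero_add]
    -- the A side
    have hfold := crossFold ((PySem.List.pyRange 0 N 1)) #[] #[] cur pre
    have hlen : (PySem.List.pyRange 0 N 1).length = n := by rw [hrange]; simp
    set t1 : Array Int := ((List.range n).map (bitf cur)).toArray with ht1
    set t2 : Array Int := ((List.range n).map (bitf pre)).toArray with ht2
    have hA : cross_ok cur pre N = crossScan t1 t2 N (PySem.List.pyRange 0 N 1) := by
      unfold cross_ok
      rw [hfold, hlen]
      simp [ht1, ht2]
    -- indexing into the bit lists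
    have hget : ∀ (x : Int) (k : Nat), k < n →
        pyAGet ((List.range n).map (bitf x)).toArray (k : Int) = bitf x k := by
      intro x k hk
      unfold pyAGet
      rw [if_neg (by omega)]
      have hj : ((k : Int)).toNat = k := by omega
      rw [hj]
      simp [Array.getD, hk]
    -- the B side
    have honelshift : (1 : Int) <<< n = ((2 ^ n : Nat) : Int) := by
      have h1 : (1 : Int) <<< n = ((1 <<< n : Nat) : Int) := rfl
      rw [h1, Nat.one_shiftLeft]
    set C : Nat := (cur % ((2 ^ n : Nat) : Int)).toNat with hCdef
    set P : Nat := (pre % ((2 ^ n : Nat) : Int)).toNat with hPdef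
    have hcc : PySem.Int.band cur ((1 : Int) <<< n - 1) = (C : Int) := by
      rw [honelshift, band_mask, hCdef,
        Int.toNat_of_nonneg (Int.emod_nonneg cur (by positivity))]
    have hpp : PySem.Int.band pre ((1 : Int) <<< n - 1) = (P : Int) := by
      rw [honelshift, band_mask, hPdef,
        Int.toNat_of_nonneg (Int.emod_nonneg pre (by positivity))]
    have hB : cross_ok_alt cur pre N
        = (((C &&& ((P <<< 1) ||| (P >>> 1)) : Nat) : Int) == 0) := by
      unfold cross_ok_alt
      rw [if_neg (by omega)]
      simp only [← hn, hcc, hpp]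
      have hsl : ((P : Int)) <<< (1 : Nat) = ((P <<< 1 : Nat) : Int) := rfl
      have hsr : ((P : Int)) >>> (1 : Nat) = ((P >>> 1 : Nat) : Int) := rfl
      rw [hsl, hsr, PySem.Int.bor_natCast, PySem.Int.band_natCast]
    -- bit bridges
    have hbC : ∀ k, k < n → (C.testBit k = true ↔ bitf cur k = 1) := by
      intro k hk
      rw [hCdef, testBit_emod_pow cur n k hk]
      simp
    have hbP : ∀ k, k < n → (P.testBit k = true ↔ bitf pre k = 1) := by
      intro k hk
      rw [hPdef, testBit_emod_pow pre n k hk]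
      simp
    have hbCh : ∀ k, n ≤ k → C.testBit k = false := fun k hk => testBit_emod_pow_high cur n k hk
    have hbPh : ∀ k, n ≤ k → P.testBit k = false := fun k hk => testBit_emod_pow_high pre n k hk
    -- assemble
    rw [hA, hB, crossScan_eq_true_iff]
    have hmem : ∀ i : Int, i ∈ PySem.List.pyRange 0 N 1 ↔ ∃ k : Nat, k < n ∧ i = (k : Int) := by
      intro i
      rw [PySem.List.mem_pyRange_one]
      constructor
      · intro h
        exact ⟨i.toNat, by omega, by omega⟩
      · rintro ⟨k, hk, rfl⟩
        exact ⟨by omega, by omega⟩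
    have hzero : (((C &&& ((P <<< 1) ||| (P >>> 1)) : Nat) : Int) == 0) = true
        ↔ (C &&& ((P <<< 1) ||| (P >>> 1)) = 0) := by
      simp
    rw [hzero, land_eq_zero_iff]
    constructor
    · -- A-scan clean → the bitwise and is zero
      intro hAll i ⟨hCi, hori⟩
      rcases lt_or_ge i n with hin | hin
      · have hAi := hAll (i : Int) ((hmem _).mpr ⟨i, hin, rfl⟩)
        rw [Nat.testBit_lor] at hori
        have hori' : (P <<< 1).testBit i = true ∨ (P >>> 1).testBit i = true := by
          simpa using hori
        rcases hori' with hlo | hhi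
        · rw [Nat.testBit_shiftLeft] at hlo
          simp only [Bool.and_eq_true, decide_eq_true_eq, ge_iff_le] at hlo
          obtain ⟨hge1, hPb⟩ := hlo
          have hi1 : i - 1 < n := by omega
          refine hAi.1 ⟨(hget cur i hin).symm ▸ (hbC i hin).mp hCi, by omega, ?_⟩
          have : ((i : Int) - 1) = ((i - 1 : Nat) : Int) := by omega
          rw [this, hget pre (i - 1) hi1]
          exact (hbP (i - 1) hi1).mp hPb
        · rw [Nat.testBit_shiftRight] at hhi
          rcases lt_or_ge (i + 1) n with hi1 | hi1
          · refine hAi.2 ⟨(hget cur i hin).symm ▸ (hbC i hin).mp hCi, by omega, ?_⟩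
            have : ((i : Int) + 1) = ((i + 1 : Nat) : Int) := by omega
            rw [this, hget pre (i + 1) hi1]
            have : 1 + i = i + 1 := by omega
            rw [this] at hhi
            exact (hbP (i + 1) hi1).mp hhi
          · have : P.testBit (1 + i) = false := hbPh (1 + i) (by omega)
            rw [this] at hhi
            exact Bool.false_ne_true hhi
      · have : C.testBit i = false := hbCh i hin
        rw [this] at hCi
        exact Bool.false_ne_true hCi
    · -- the bitwise and is zero → A-scan clean
      intro hZ i hi
      rcases (hmem i).mp hi with ⟨k, hk, rfl⟩
      constructor
      · rintro ⟨hb1, hge, hb2⟩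
        rw [hget cur k hk] at hb1
        have hk1 : 1 ≤ k := by omega
        have hkm : k - 1 < n := by omega
        have : ((k : Int) - 1) = ((k - 1 : Nat) : Int) := by omega
        rw [this, hget pre (k - 1) hkm] at hb2
        refine hZ k ⟨(hbC k hk).mpr hb1, ?_⟩
        rw [Nat.testBit_lor, Nat.testBit_shiftLeft]
        have : (decide (k ≥ 1) && P.testBit (k - 1)) = true := by
          rw [Bool.and_eq_true]
          exact ⟨by simpa using hk1, (hbP (k - 1) hkm).mpr hb2⟩
        rw [this]
        simp
      · rintro ⟨hb1, hlt, hb2⟩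
        rw [hget cur k hk] at hb1
        have hkp : k + 1 < n := by omega
        have : ((k : Int) + 1) = ((k + 1 : Nat) : Int) := by omega
        rw [this, hget pre (k + 1) hkp] at hb2
        refine hZ k ⟨(hbC k hk).mpr hb1, ?_⟩
        rw [Nat.testBit_lor, Nat.testBit_shiftRight]
        have : 1 + k = k + 1 := by omega
        rw [this]
        rw [(hbP (k + 1) hkp).mpr hb2]
        simp

-- ===== VERDICT (by name: the statement is the Claim_ definition above) =====
theorem cross_ok_spec : Claim_equal_cross_ok := by
  intro cur pre N _hdom
  unfold Spec_cross_ok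
  exact cross_ok_spec_aux cur pre N
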